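-- pv_equiv track=rewrite | github.com/skfkzpql/BOJ_AutoPush | 프로그래머스/1/258712. 가장 많이 받은 선물/가장 많이 받은 선물.py | solution
-- ===== SOURCE A (Python) =====
-- def solution(friends, gifts):
--     d=dict((b,a) for a,b in enumerate(friends,0))
--     l = [[0 for _ in range(len(friends))] for _ in range(len(friends))]
--     r = dict(zip(friends,[0 for _ in range(len(friends))]))
--
--     lcopy =[0 for _ in range(len(friends))]
--
--     for i in gifts:
--         i, j = i.split()
--         r[i] += 1
--         r[j] -= 1
--         l[d[i]][d[j]] += 1
--
--
--     for i in range(len(friends)):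
--         for j in range(len(friends)):
--             if i < j:
--                 k = l[i][j] - l[j][i]
--                 if k == 0:
--                     if r[friends[i]] > r[friends[j]]:
--                         lcopy[i] += 1
--                     elif r[friends[i]] < r[friends[j]]:
--                         lcopy[j] += 1
--                 elif k > 0:
--                     lcopy[i] += 1
--                 elif k < 0:
--                     lcopy[j] += 1
--
--     answer = max(lcopy)
--     return answer
-- ===== SOURCE B (Python) =====
-- def solution(friends, gifts):
--     # Structure-free recount: no index dict, no count matrix, no score list and no
--     # counters at all -- every pairwise comparison recounts directly over the split
--     # gift lines, and the answer is a max over per-person comprehension sums.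
--     pairs = [g.split() for g in gifts]
--
--     def net(a, b):
--         return pairs.count([a, b]) - pairs.count([b, a])
--
--     def score(a):
--         return sum((p[0] == a) - (p[1] == a) for p in pairs)
--
--     return max(sum(net(a, b) > 0 or (net(a, b) == 0 and score(a) > score(b))
--                    for b in friends)
--                for a in friends)
-- ===== Notes on version B (the rewrite author's own statement) =====
-- stated objective: alternative
-- what changed: Drops all of A's auxiliary structures (name-to-index dict, n x n count matrix, net-score dict, per-person score list): B splits the gift lines once and decides each pairwise comparison by recounting directly over that list (list.count for the pair balance, a sum of indicator differences for the tie-break score), returning a max of per-person comprehension sums.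
-- outside the precondition, e.g. on solution(['b', 'a', 'a', 'd'], ['a d', 'b a', 'd b']): A returns 1, B returns 2
import Mathlib
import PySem

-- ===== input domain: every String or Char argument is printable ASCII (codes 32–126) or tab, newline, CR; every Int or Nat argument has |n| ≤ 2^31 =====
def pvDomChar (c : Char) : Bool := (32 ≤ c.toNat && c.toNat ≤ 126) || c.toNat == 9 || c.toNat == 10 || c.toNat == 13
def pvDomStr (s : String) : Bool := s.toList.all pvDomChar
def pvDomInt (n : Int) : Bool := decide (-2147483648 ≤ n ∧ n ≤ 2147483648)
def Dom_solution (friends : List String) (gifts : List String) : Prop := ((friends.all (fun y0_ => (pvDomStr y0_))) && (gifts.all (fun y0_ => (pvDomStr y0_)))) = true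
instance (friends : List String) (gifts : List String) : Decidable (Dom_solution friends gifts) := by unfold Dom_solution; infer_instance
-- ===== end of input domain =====

-- B drops all of A's auxiliary structures (index dict, count matrix, score dict/list) and
-- decides each pairwise comparison by recounting over the split gift list (objective: alternative).

-- ===== PORT A =====
-- A-side helper: d = dict((b,a) for a,b in enumerate(friends,0))
def dOf (friends : List String) : PySem.Dict String Int :=
  (PySem.List.enumerate friends 0).foldl (fun d p => d.insert p.2 p.1) PySem.Dict.empty

-- the body of A's 'for i in gifts' loop (d is the name→index dict; state = (r, l));
-- the '_ => st' arm is Python's ValueError on unpacking / KeyError on a missing name: excluded by Pre_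
def giftStepA (d : PySem.Dict String Int) (st : PySem.Dict String Int × List (List Int))
    (s : String) : PySem.Dict String Int × List (List Int) :=
  match PySem.Str.split₀ s with
  | [i, j] =>
      let r := st.1.modify i 0 (· + 1)           -- r[i] += 1
      let r := r.modify j 0 (· + (-1))           -- r[j] -= 1
      let di := d.getD i 0
      let dj := d.getD j 0
      let row := PySem.List.pyGetD st.2 di []
      (r, PySem.List.pySetD st.2 di (PySem.List.pySetD row dj (PySem.List.pyGetD row dj 0 + 1)))
  | _ => st

-- the body of A's inner 'for j in range(len(friends))' loop
def pairBodyA (l : List (List Int)) (r : PySem.Dict String Int) (friends : List String)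
    (lcopy : List Int) (i j : Int) : List Int :=
  if i < j then
    let k := PySem.List.pyGetD (PySem.List.pyGetD l i []) j 0 -
             PySem.List.pyGetD (PySem.List.pyGetD l j []) i 0
    if k = 0 then
      if r.getD (PySem.List.pyGetD friends i "") 0 > r.getD (PySem.List.pyGetD friends j "") 0 then
        PySem.List.pySetD lcopy i (PySem.List.pyGetD lcopy i 0 + 1)
      else if r.getD (PySem.List.pyGetD friends i "") 0 < r.getD (PySem.List.pyGetD friends j "") 0 then
        PySem.List.pySetD lcopy j (PySem.List.pyGetD lcopy j 0 + 1)
      else lcopy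
    else if k > 0 then PySem.List.pySetD lcopy i (PySem.List.pyGetD lcopy i 0 + 1)
    else if k < 0 then PySem.List.pySetD lcopy j (PySem.List.pyGetD lcopy j 0 + 1)
    else lcopy
  else lcopy

def solution (friends : List String) (gifts : List String) : Int :=
  let d : PySem.Dict String Int := dOf friends
  let n := friends.length
  let l : List (List Int) := List.replicate n (List.replicate n 0)
  let r : PySem.Dict String Int := PySem.Dict.ofList (friends.zip (List.replicate n (0 : Int)))
  let st := gifts.foldl (giftStepA d) (r, l)
  let lcopy : List Int := List.replicate n 0
  let lcopy := (PySem.List.pyRange 0 (n : Int) 1).foldl (fun lcopy i =>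
      (PySem.List.pyRange 0 (n : Int) 1).foldl
        (fun lcopy j => pairBodyA st.2 st.1 friends lcopy i j) lcopy) lcopy
  -- answer = max(lcopy); ValueError on an empty list: excluded by Pre_
  (PySem.List.max? lcopy (fun x => x)).getD 0

-- ===== PORT B =====
-- pairs.count([a, b]) - pairs.count([b, a])
def netB (pairs : List (List String)) (a b : String) : Int :=
  (PySem.List.count pairs [a, b] : Int) - (PySem.List.count pairs [b, a] : Int)

-- sum((p[0] == a) - (p[1] == a) for p in pairs); p[0]/p[1] on a malformed line
-- would be an IndexError in Python: such gift lines are excluded by Pre_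
def scoreB (pairs : List (List String)) (a : String) : Int :=
  (pairs.map (fun p =>
    (if PySem.List.pyGetD p 0 "" == a then (1 : Int) else 0) -
    (if PySem.List.pyGetD p 1 "" == a then (1 : Int) else 0))).sum

-- sum(net(a, b) > 0 or (net(a, b) == 0 and score(a) > score(b)) for b in friends)
def winsOf (pairs : List (List String)) (friends : List String) (a : String) : Int :=
  (friends.map (fun b =>
    if netB pairs a b > 0 ∨ (netB pairs a b = 0 ∧ scoreB pairs a > scoreB pairs b)
    then (1 : Int) else 0)).sum

def solution_alt (friends : List String) (gifts : List String) : Int :=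
  let pairs := gifts.map PySem.Str.split₀
  -- max(... for a in friends); ValueError on empty friends: excluded by Pre_
  (PySem.List.max? (friends.map (winsOf pairs friends)) (fun x => x)).getD 0

-- ===== PRECONDITION & SPEC =====
-- does a gift line split into exactly two names, both known?
def giftOk (friends : List String) (s : String) : Bool :=
  match PySem.Str.split₀ s with
  | [a, b] => friends.contains a && friends.contains b
  | _ => false

-- Pre_ excludes: friends = [] (A's max([]) raises ValueError); gift lines that do not split into
-- two known names (A raises ValueError/KeyError); and friends lists with duplicate names combined
-- with a nonempty gift list, where A still returns a value but its name→last-index aliasing is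
-- accidental (both behaviours defensible on duplicate keys).
def Pre_solution (friends : List String) (gifts : List String) : Prop :=
  friends ≠ [] ∧ (gifts = [] ∨ friends.Nodup) ∧ ∀ s ∈ gifts, giftOk friends s = true
instance (friends : List String) (gifts : List String) : Decidable (Pre_solution friends gifts) := by
  unfold Pre_solution; infer_instance

def pvWitness_solution : List String × List String := (["a", "b"], ["a b"])

def Spec_solution (friends : List String) (gifts : List String) (out : Int) : Prop :=
  out = solution_alt friends gifts
instance (friends : List String) (gifts : List String) (out : Int) :
    Decidable (Spec_solution friends gifts out) := by unfold Spec_solution; infer_instance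

-- ===== CLAIM (what is proved, stated in full; the proofs are below) =====
def Claim_equal_solution : Prop := ∀ (friends : List String) (gifts : List String),
  Dom_solution friends gifts → Pre_solution friends gifts →
  Spec_solution friends gifts (solution friends gifts)

-- ===== LEMMAS AND PROOFS =====

-- ——— proof-side step functions: the components of A's gift fold, plus a ghost pair counter ———
def stepR (r : PySem.Dict String Int) (s : String) : PySem.Dict String Int :=
  match PySem.Str.split₀ s with
  | [a, b] => (r.modify a 0 (· + 1)).modify b 0 (· + (-1))
  | _ => r

def stepL (d : PySem.Dict String Int) (l : List (List Int)) (s : String) : List (List Int) :=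
  match PySem.Str.split₀ s with
  | [a, b] =>
      let di := d.getD a 0
      let dj := d.getD b 0
      let row := PySem.List.pyGetD l di []
      PySem.List.pySetD l di (PySem.List.pySetD row dj (PySem.List.pyGetD row dj 0 + 1))
  | _ => l

def stepC (cnt : PySem.Dict (String × String) Int) (s : String) : PySem.Dict (String × String) Int :=
  match PySem.Str.split₀ s with
  | [a, b] => cnt.modify (a, b) 0 (· + 1)
  | _ => cnt

-- "a beats b" on the final counters
def beats (cnt : PySem.Dict (String × String) Int) (g : PySem.Dict String Int)
    (a b : String) : Bool :=
  decide (0 < cnt.getD (a, b) 0 - cnt.getD (b, a) 0) ||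
  (decide (cnt.getD (a, b) 0 - cnt.getD (b, a) 0 = 0) && decide (g.getD b 0 < g.getD a 0))

lemma beats_iff (cnt : PySem.Dict (String × String) Int) (g : PySem.Dict String Int)
    (a b : String) : beats cnt g a b = true ↔
      (0 < cnt.getD (a, b) 0 - cnt.getD (b, a) 0 ∨
        (cnt.getD (a, b) 0 - cnt.getD (b, a) 0 = 0 ∧ g.getD b 0 < g.getD a 0)) := by
  simp [beats]

lemma beats_excl (cnt : PySem.Dict (String × String) Int) (g : PySem.Dict String Int)
    (a b : String) (h : beats cnt g a b = true) : beats cnt g b a = false := by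
  rw [Bool.eq_false_iff]
  intro h'
  rw [beats_iff] at h h'
  omega

lemma beats_self (cnt : PySem.Dict (String × String) Int) (g : PySem.Dict String Int)
    (a : String) : beats cnt g a a = false := by
  rw [Bool.eq_false_iff]
  intro h
  rw [beats_iff] at h
  omega

-- ——— splitting A's simultaneous gift fold into its components ———
lemma foldA_fst (d : PySem.Dict String Int) (gifts : List String) :
    ∀ (r : PySem.Dict String Int) (l : List (List Int)),
    (gifts.foldl (giftStepA d) (r, l)).1 = gifts.foldl stepR r := by
  induction gifts with
  | nil => intro r l; rfl
  | cons s t ih =>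
      intro r l
      rcases h : PySem.Str.split₀ s with _ | ⟨a, _ | ⟨b, _ | ⟨c, u⟩⟩⟩ <;>
        simp only [List.foldl_cons, giftStepA, stepR, h] <;> apply ih

lemma foldA_snd (d : PySem.Dict String Int) (gifts : List String) :
    ∀ (r : PySem.Dict String Int) (l : List (List Int)),
    (gifts.foldl (giftStepA d) (r, l)).2 = gifts.foldl (stepL d) l := by
  induction gifts with
  | nil => intro r l; rfl
  | cons s t ih =>
      intro r l
      rcases h : PySem.Str.split₀ s with _ | ⟨a, _ | ⟨b, _ | ⟨c, u⟩⟩⟩ <;>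
        simp only [List.foldl_cons, giftStepA, stepL, h] <;> apply ih

-- A's r starts from the same dict as the all-zero dict over friends
lemma zip_repl (fs : List String) :
    fs.zip (List.replicate fs.length (0 : Int)) = fs.map (fun f => (f, (0 : Int))) := by
  induction fs with
  | nil => rfl
  | cons f t ih => simpa [List.replicate_succ] using ih

-- ——— the name→index dict ———
lemma dfold_miss (fs : List String) :
    ∀ (s : Int) (d0 : PySem.Dict String Int) (a : String), a ∉ fs →
    ((PySem.List.enumerate fs s).foldl (fun d p => d.insert p.2 p.1) d0).get? a = d0.get? a := by
  induction fs with
  | nil => intro s d0 a _; simp [PySem.List.enumerate_nil]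
  | cons f t ih =>
      intro s d0 a ha
      rw [PySem.List.enumerate_cons, List.foldl_cons]
      rw [ih (s + 1) _ a (by simp_all)]
      exact PySem.Dict.get?_insert_of_ne _ _ (by simp_all)

lemma dfold_getD (fs : List String) :
    ∀ (s : Int) (d0 : PySem.Dict String Int) (a : String), fs.Nodup → a ∈ fs →
    ((PySem.List.enumerate fs s).foldl (fun d p => d.insert p.2 p.1) d0).getD a 0 =
      s + (fs.idxOf a : Int) := by
  induction fs with
  | nil => intro _ _ _ _ h; simp at h
  | cons f t ih =>
      intro s d0 a hnd ha
      rw [PySem.List.enumerate_cons, List.foldl_cons]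
      by_cases hf : a = f
      · subst hf
        have hnt : a ∉ t := (List.nodup_cons.mp hnd).1
        rw [PySem.Dict.getD_eq_get?_getD, dfold_miss t (s + 1) _ a hnt]
        simp [PySem.Dict.get?_insert_self]
      · have hat : a ∈ t := by simp_all
        rw [ih (s + 1) _ a (List.nodup_cons.mp hnd).2 hat]
        rw [List.idxOf_cons_ne _ (fun h => hf h.symm)]
        push_cast
        ring

lemma d_getD (friends : List String) (a : String) (hnd : friends.Nodup) (ha : a ∈ friends) :
    (dOf friends).getD a 0 = (friends.idxOf a : Int) := by
  simpa [dOf] using dfold_getD friends 0 PySem.Dict.empty a hnd ha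

-- index bookkeeping
lemma idxOf_lt (fs : List String) (a : String) (ha : a ∈ fs) : fs.idxOf a < fs.length :=
  List.idxOf_lt_length_of_mem ha

lemma idx_inj (fs : List String) (a b : String) (ha : a ∈ fs) (hb : b ∈ fs) (hne : a ≠ b) :
    fs.idxOf a ≠ fs.idxOf b := by
  intro h
  apply hne
  have h1 : fs[fs.idxOf a]? = some a := by
    rw [List.getElem?_eq_getElem (idxOf_lt fs a ha), List.getElem_idxOf (idxOf_lt fs a ha)]
  have h2 : fs[fs.idxOf b]? = some b := by
    rw [List.getElem?_eq_getElem (idxOf_lt fs b hb), List.getElem_idxOf (idxOf_lt fs b hb)]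
  rw [h, h2] at h1
  exact (Option.some_injective _ h1).symm

lemma idxOf_getD (fs : List String) (hnd : fs.Nodup) (k : Nat) (hk : k < fs.length) :
    fs.idxOf (fs.getD k "") = k := by
  rw [List.getD_eq_getElem fs "" hk]
  have hm : fs[k] ∈ fs := List.getElem_mem hk
  have h1 := List.getElem_idxOf (idxOf_lt fs fs[k] hm)
  exact (List.Nodup.getElem_inj_iff hnd).mp h1

lemma getD_mem (fs : List String) (k : Nat) (hk : k < fs.length) : fs.getD k "" ∈ fs := by
  rw [List.getD_eq_getElem fs "" hk]; exact List.getElem_mem hk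

-- list.set / getD bookkeeping
lemma getD_set_ne {xs : List Int} {i j : Nat} (v d : Int) (h : i ≠ j) :
    (xs.set i v).getD j d = xs.getD j d := by
  simp [List.getD_eq_getElem?_getD, List.getElem?_set_ne h]

lemma getD_set_self {xs : List Int} {i : Nat} (v d : Int) (h : i < xs.length) :
    (xs.set i v).getD i d = v := by
  simp [List.getD_eq_getElem?_getD, List.getElem?_set_self h]

lemma getD_set_ne' {xs : List (List Int)} {i j : Nat} (v d : List Int) (h : i ≠ j) :
    (xs.set i v).getD j d = xs.getD j d := by
  simp [List.getD_eq_getElem?_getD, List.getElem?_set_ne h]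

lemma getD_set_self' {xs : List (List Int)} {i : Nat} (v d : List Int) (h : i < xs.length) :
    (xs.set i v).getD i d = v := by
  simp [List.getD_eq_getElem?_getD, List.getElem?_set_self h]

-- ——— matrix/counter invariant through the gift fold ———
def MShape (n : Nat) (l : List (List Int)) : Prop :=
  l.length = n ∧ ∀ row ∈ l, row.length = n

def MInv (friends : List String) (l : List (List Int))
    (cnt : PySem.Dict (String × String) Int) : Prop :=
  ∀ a ∈ friends, ∀ b ∈ friends,
    (l.getD (friends.idxOf a) []).getD (friends.idxOf b) 0 = cnt.getD (a, b) 0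

lemma step_pres (friends : List String) (hnd : friends.Nodup) (s : String)
    (hok : giftOk friends s = true) (l : List (List Int))
    (cnt : PySem.Dict (String × String) Int)
    (hs : MShape friends.length l) (hinv : MInv friends l cnt) :
    MShape friends.length (stepL (dOf friends) l s) ∧
      MInv friends (stepL (dOf friends) l s) (stepC cnt s) := by
  unfold giftOk at hok
  rcases h : PySem.Str.split₀ s with _ | ⟨a, _ | ⟨b, _ | ⟨c, u⟩⟩⟩ <;> rw [h] at hok
  case nil => exact absurd hok (by simp)
  case cons.nil => exact absurd hok (by simp)
  case cons.cons.cons => exact absurd hok (by simp)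
  obtain ⟨ha, hb⟩ : a ∈ friends ∧ b ∈ friends := by
    have hab : (friends.contains a && friends.contains b) = true := hok
    simpa using hab
  simp only [stepL, stepC, h]
  rw [d_getD friends a hnd ha, d_getD friends b hnd hb,
    PySem.List.pyGetD_natCast, PySem.List.pyGetD_natCast, PySem.List.pySetD_natCast,
    PySem.List.pySetD_natCast]
  have hial : friends.idxOf a < l.length := by rw [hs.1]; exact idxOf_lt _ _ ha
  have hrowmem : l.getD (friends.idxOf a) [] ∈ l := by
    rw [List.getD_eq_getElem l [] hial]; exact List.getElem_mem hial
  have hrow : (l.getD (friends.idxOf a) []).length = friends.length := hs.2 _ hrowmem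
  have hibl : friends.idxOf b < (l.getD (friends.idxOf a) []).length := by
    rw [hrow]; exact idxOf_lt _ _ hb
  refine ⟨⟨by simp [hs.1], ?_⟩, ?_⟩
  · intro row hr
    rcases List.mem_or_eq_of_mem_set hr with h' | h'
    · exact hs.2 _ h'
    · rw [h', List.length_set, hrow]
  · intro x hx y hy
    rw [PySem.Dict.getD_modify]
    by_cases hxa : x = a
    · subst hxa
      rw [getD_set_self' _ _ hial]
      by_cases hyb : y = b
      · subst hyb
        rw [getD_set_self _ _ hibl, if_pos rfl, hinv x hx y hy]
      · have hiy : friends.idxOf b ≠ friends.idxOf y := idx_inj friends b y hb hy (fun h => hyb h.symm)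
        rw [getD_set_ne _ _ hiy, if_neg (by simp [hyb]), hinv x hx y hy]
    · have hix : friends.idxOf a ≠ friends.idxOf x := idx_inj friends a x ha hx (fun h => hxa h.symm)
      rw [getD_set_ne' _ _ hix, if_neg (by simp [Prod.ext_iff, hxa]), hinv x hx y hy]

lemma fold_pres (friends : List String) (hnd : friends.Nodup) (gifts : List String) :
    ∀ (l : List (List Int)) (cnt : PySem.Dict (String × String) Int),
    (∀ s ∈ gifts, giftOk friends s = true) →
    MShape friends.length l → MInv friends l cnt →
    MShape friends.length (gifts.foldl (stepL (dOf friends)) l) ∧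
      MInv friends (gifts.foldl (stepL (dOf friends)) l) (gifts.foldl stepC cnt) := by
  induction gifts with
  | nil => intro l cnt _ hs hinv; exact ⟨hs, hinv⟩
  | cons s t ih =>
      intro l cnt hok hs hinv
      have h1 := step_pres friends hnd s (hok s (by simp)) l cnt hs hinv
      exact ih _ _ (fun x hx => hok x (by simp [hx])) h1.1 h1.2

lemma init_inv (friends : List String) :
    MShape friends.length
        (List.replicate friends.length (List.replicate friends.length (0 : Int))) ∧
      MInv friends (List.replicate friends.length (List.replicate friends.length (0 : Int)))
        PySem.Dict.empty := by
  refine ⟨⟨by simp, fun row hr => by simp [List.eq_of_mem_replicate hr]⟩, ?_⟩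
  intro a ha b hb
  rw [PySem.Dict.getD_empty,
    List.getD_replicate _ (idxOf_lt friends a ha),
    List.getD_replicate _ (idxOf_lt friends b hb)]

-- ——— B's recounts equal the ghost counter / A's score dict ———
lemma stepC_count (gifts : List String) (x y : String) :
    ∀ (c : PySem.Dict (String × String) Int),
    (∀ s ∈ gifts, ∃ a b, PySem.Str.split₀ s = [a, b]) →
    (gifts.foldl stepC c).getD (x, y) 0 =
      c.getD (x, y) 0 + (PySem.List.count (gifts.map PySem.Str.split₀) [x, y] : Int) := by
  induction gifts with
  | nil => intro c _; simp [PySem.List.count_eq]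
  | cons s t ih =>
      intro c hok
      obtain ⟨a, b, hs⟩ := hok s (by simp)
      rw [List.foldl_cons, List.map_cons]
      have hstep : stepC c s = c.modify (a, b) 0 (· + 1) := by simp [stepC, hs]
      rw [hstep, ih _ (fun u hu => hok u (by simp [hu])), PySem.Dict.getD_modify, hs,
        PySem.List.count_eq, PySem.List.count_eq, List.count_cons]
      by_cases hxy : (x, y) = (a, b)
      · rw [Prod.mk.injEq] at hxy
        obtain ⟨rfl, rfl⟩ := hxy
        rw [if_pos rfl]
        have hbt : ([x, y] == [x, y]) = true := by simp
        rw [hbt, if_pos rfl]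
        push_cast
        ring
      · rw [if_neg hxy]
        have hne : ([a, b] == [x, y]) = false := by
          simp only [beq_iff_eq, Bool.eq_false_iff, ne_eq]
          intro h
          apply hxy
          simp at h
          simp [h.1, h.2]
        rw [hne]
        simp

lemma pyGetD_pair0 (a b : String) : PySem.List.pyGetD [a, b] (0 : Int) "" = a := by
  simp [PySem.List.pyGetD, PySem.List.pyGet?, PySem.List.pyIdx?]

lemma pyGetD_pair1 (a b : String) : PySem.List.pyGetD [a, b] (1 : Int) "" = b := by
  simp [PySem.List.pyGetD, PySem.List.pyGet?, PySem.List.pyIdx?]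

lemma stepR_score (gifts : List String) (x : String) :
    ∀ (g : PySem.Dict String Int),
    (∀ s ∈ gifts, ∃ a b, PySem.Str.split₀ s = [a, b]) →
    (gifts.foldl stepR g).getD x 0 = g.getD x 0 + scoreB (gifts.map PySem.Str.split₀) x := by
  induction gifts with
  | nil => intro g _; simp [scoreB]
  | cons s t ih =>
      intro g hok
      obtain ⟨a, b, hs⟩ := hok s (by simp)
      rw [List.foldl_cons, List.map_cons]
      have hstep : stepR g s = (g.modify a 0 (· + 1)).modify b 0 (· + (-1)) := by
        simp [stepR, hs]
      rw [hstep, ih _ (fun u hu => hok u (by simp [hu]))]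
      have hsc : scoreB (PySem.Str.split₀ s :: t.map PySem.Str.split₀) x =
          ((if a == x then (1 : Int) else 0) - (if b == x then (1 : Int) else 0)) +
            scoreB (t.map PySem.Str.split₀) x := by
        simp only [scoreB, List.map_cons, List.sum_cons, hs, pyGetD_pair0, pyGetD_pair1]
      rw [hsc]
      simp only [PySem.Dict.getD_modify, beq_iff_eq]
      split_ifs <;> subst_vars <;> (try ring) <;> simp_all <;> try ring

-- ——— B's per-person sum as a countP, and its value at index k ———
lemma winsOf_countP (pairs : List (List String)) (friends : List String) (a : String)
    (cnt : PySem.Dict (String × String) Int) (g : PySem.Dict String Int)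
    (hnet : ∀ x y, netB pairs x y = cnt.getD (x, y) 0 - cnt.getD (y, x) 0)
    (hsc : ∀ x, scoreB pairs x = g.getD x 0) :
    winsOf pairs friends a = (friends.countP (fun b => beats cnt g a b) : Int) := by
  unfold winsOf
  rw [← PySem.List.sum_map_ite_one_zero (fun b => beats cnt g a b) friends]
  congr 1
  apply List.map_congr_left
  intro b _
  rw [hnet a b, hsc a, hsc b]
  by_cases hc : 0 < cnt.getD (a, b) 0 - cnt.getD (b, a) 0 ∨
      (cnt.getD (a, b) 0 - cnt.getD (b, a) 0 = 0 ∧ g.getD b 0 < g.getD a 0)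
  · rw [if_pos hc, if_pos ((beats_iff cnt g a b).mpr hc)]
  · rw [if_neg hc, if_neg (fun hx => hc ((beats_iff cnt g a b).mp hx))]

-- the per-slot value of A's final score list
def W (cnt : PySem.Dict (String × String) Int) (g : PySem.Dict String Int)
    (F : Nat → String) (n k : Nat) : Int :=
  ((List.range n).countP (fun j => decide (j ≠ k) && beats cnt g (F k) (F j)) : Int)

lemma friends_eq_map (fs : List String) :
    fs = (List.range fs.length).map (fun k => fs.getD k "") := by
  apply List.ext_getElem (by simp)
  intro k h1 h2
  simp [List.getElem?_eq_getElem h1]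

lemma countP_getD (fs : List String) (p : String → Bool) :
    fs.countP p = (List.range fs.length).countP (fun j => p (fs.getD j "")) := by
  conv_lhs => rw [friends_eq_map fs]
  rw [List.countP_map]
  rfl

lemma countP_beats_W (cnt : PySem.Dict (String × String) Int) (g : PySem.Dict String Int)
    (friends : List String) (hnd : friends.Nodup) (k : Nat) (hk : k < friends.length) :
    (friends.countP (fun b => beats cnt g (friends.getD k "") b) : Int) =
      W cnt g (fun j => friends.getD j "") friends.length k := by
  have hins : friends.countP (fun b => beats cnt g (friends.getD k "") b) =
      friends.countP (fun b => decide (friends.getD k "" ≠ b) &&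
        beats cnt g (friends.getD k "") b) := by
    apply List.countP_congr
    intro b _
    by_cases hb : friends.getD k "" = b
    · rw [← hb, beats_self]; simp
    · have hb' : (decide (friends.getD k "" ≠ b)) = true := decide_eq_true hb
      rw [hb', Bool.true_and]
  rw [hins, countP_getD]
  unfold W
  congr 1
  apply List.countP_congr
  intro j hj
  have hjn : j < friends.length := List.mem_range.mp hj
  simp only [Bool.and_eq_true, decide_eq_true_eq]
  have hne : (friends.getD k "" ≠ friends.getD j "") ↔ j ≠ k := by
    rw [List.getD_eq_getElem _ _ hk, List.getD_eq_getElem _ _ hjn, ne_eq,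
      List.Nodup.getElem_inj_iff hnd]
    exact not_congr ⟨fun h => h.symm, fun h => h.symm⟩
  rw [hne]

-- ——— A's pairwise loop ———
-- canonical Nat-indexed form of A's inner-loop body
def body (cnt : PySem.Dict (String × String) Int) (g : PySem.Dict String Int)
    (F : Nat → String) (lc : List Int) (i j : Nat) : List Int :=
  if i < j then
    if beats cnt g (F i) (F j) then lc.set i (lc.getD i 0 + 1)
    else if beats cnt g (F j) (F i) then lc.set j (lc.getD j 0 + 1)
    else lc
  else lc

lemma pairBody_eq (friends : List String) (L : List (List Int))
    (cnt : PySem.Dict (String × String) Int) (g : PySem.Dict String Int)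
    (hL : ∀ i j : Nat, i < friends.length → j < friends.length →
      (L.getD i []).getD j 0 = cnt.getD (friends.getD i "", friends.getD j "") 0)
    (lc : List Int) (i j : Nat) (hi : i < friends.length) (hj : j < friends.length) :
    pairBodyA L g friends lc (i : Int) (j : Int) =
      body cnt g (fun k => friends.getD k "") lc i j := by
  unfold pairBodyA body
  simp only [PySem.List.pyGetD_natCast, PySem.List.pySetD_natCast, Nat.cast_lt]
  simp only [gt_iff_lt]
  by_cases hij : i < j
  · rw [if_pos hij, if_pos hij, hL i j hi hj, hL j i hj hi]
    have e1 : cnt.getD (friends.getD j "", friends.getD i "") 0 -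
        cnt.getD (friends.getD i "", friends.getD j "") 0 =
        -(cnt.getD (friends.getD i "", friends.getD j "") 0 -
          cnt.getD (friends.getD j "", friends.getD i "") 0) := by ring
    rcases lt_trichotomy (cnt.getD (friends.getD i "", friends.getD j "") 0 -
        cnt.getD (friends.getD j "", friends.getD i "") 0) 0 with h0 | h0 | h0
    · have n1 : ¬ (cnt.getD (friends.getD i "", friends.getD j "") 0 -
          cnt.getD (friends.getD j "", friends.getD i "") 0 = 0) := by omega
      have b1 : beats cnt g (friends.getD i "") (friends.getD j "") = false := by
        rw [Bool.eq_false_iff]; intro hx; rw [beats_iff] at hx; omega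
      have b2 : beats cnt g (friends.getD j "") (friends.getD i "") = true := by
        rw [beats_iff, e1]; omega
      rw [if_neg n1, if_neg (by omega), if_pos h0, b1, b2]
      simp
    · rcases lt_trichotomy (g.getD (friends.getD i "") 0) (g.getD (friends.getD j "") 0)
        with hg | hg | hg
      · have b1 : beats cnt g (friends.getD i "") (friends.getD j "") = false := by
          rw [Bool.eq_false_iff]; intro hx; rw [beats_iff] at hx; omega
        have b2 : beats cnt g (friends.getD j "") (friends.getD i "") = true := by
          rw [beats_iff, e1]; omega
        rw [if_pos h0, if_neg (by omega), if_pos hg, b1, b2]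
        simp
      · have b1 : beats cnt g (friends.getD i "") (friends.getD j "") = false := by
          rw [Bool.eq_false_iff]; intro hx; rw [beats_iff] at hx; omega
        have b2 : beats cnt g (friends.getD j "") (friends.getD i "") = false := by
          rw [Bool.eq_false_iff]; intro hx; rw [beats_iff, e1] at hx; omega
        rw [if_pos h0, if_neg (by omega), if_neg (by omega), b1, b2]
        simp
      · have b1 : beats cnt g (friends.getD i "") (friends.getD j "") = true := by
          rw [beats_iff]; omega
        rw [if_pos h0, if_pos hg, b1]
        simp
    · have b1 : beats cnt g (friends.getD i "") (friends.getD j "") = true := by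
        rw [beats_iff]; omega
      have n1 : ¬ (cnt.getD (friends.getD i "", friends.getD j "") 0 -
          cnt.getD (friends.getD j "", friends.getD i "") 0 = 0) := by omega
      rw [if_neg n1, if_pos h0, b1]
      simp
  · rw [if_neg hij, if_neg hij]

-- contribution of processed pair (i,j) to slot k
def aw (cnt : PySem.Dict (String × String) Int) (g : PySem.Dict String Int)
    (F : Nat → String) (i j k : Nat) : Int :=
  if i < j ∧ ((k = i ∧ beats cnt g (F i) (F j) = true) ∨
              (k = j ∧ beats cnt g (F j) (F i) = true)) then 1 else 0

lemma body_getD (cnt : PySem.Dict (String × String) Int) (g : PySem.Dict String Int)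
    (F : Nat → String) (lc : List Int) (i j k : Nat)
    (hi : i < lc.length) (hj : j < lc.length) :
    (body cnt g F lc i j).length = lc.length ∧
      (body cnt g F lc i j).getD k 0 = lc.getD k 0 + aw cnt g F i j k := by
  unfold body aw
  by_cases hij : i < j
  · by_cases hb1 : beats cnt g (F i) (F j) = true
    · rw [if_pos hij, if_pos hb1]
      refine ⟨List.length_set, ?_⟩
      by_cases hk : k = i
      · subst hk
        rw [getD_set_self _ _ hi, if_pos ⟨hij, Or.inl ⟨rfl, hb1⟩⟩]
      · rw [getD_set_ne _ _ (fun h => hk h.symm), if_neg ?_]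
        · ring
        · rintro ⟨_, (⟨hki, _⟩ | ⟨hkj, hb2⟩)⟩
          · exact hk hki
          · rw [beats_excl cnt g (F i) (F j) hb1] at hb2; exact Bool.false_ne_true hb2
    · by_cases hb2 : beats cnt g (F j) (F i) = true
      · rw [if_pos hij, if_neg hb1, if_pos hb2]
        refine ⟨List.length_set, ?_⟩
        by_cases hk : k = j
        · subst hk
          rw [getD_set_self _ _ hj, if_pos ⟨hij, Or.inr ⟨rfl, hb2⟩⟩]
        · rw [getD_set_ne _ _ (fun h => hk h.symm), if_neg ?_]
          · ring
          · rintro ⟨_, (⟨hki, hb1'⟩ | ⟨hkj, _⟩)⟩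
            · exact hb1 hb1'
            · exact hk hkj
      · rw [if_pos hij, if_neg hb1, if_neg hb2]
        refine ⟨rfl, ?_⟩
        rw [if_neg ?_]
        · ring
        · rintro ⟨_, (⟨_, hb1'⟩ | ⟨_, hb2'⟩)⟩
          · exact hb1 hb1'
          · exact hb2 hb2'
  · rw [if_neg hij]
    refine ⟨rfl, ?_⟩
    rw [if_neg (fun h : _ ∧ _ => hij h.1)]
    ring

-- generic accumulation over a fold that adds c i to slot k
lemma foldl_getD_sum {ι : Type} (xs : List ι) (Fn : List Int → ι → List Int) (c : ι → Int)
    (m k : Nat)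
    (hF : ∀ lc i, lc.length = m → i ∈ xs →
      (Fn lc i).length = m ∧ (Fn lc i).getD k 0 = lc.getD k 0 + c i) :
    ∀ lc, lc.length = m →
      (xs.foldl Fn lc).length = m ∧
        (xs.foldl Fn lc).getD k 0 = lc.getD k 0 + (xs.map c).sum := by
  induction xs with
  | nil => intro lc h; simp [h]
  | cons x t ih =>
      intro lc h
      have hx := hF lc x h (by simp)
      have ht := ih (fun lc i hlc hi => hF lc i hlc (by simp [hi])) (Fn lc x) hx.1
      refine ⟨ht.1, ?_⟩
      rw [List.foldl_cons, ht.2, hx.2]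
      simp only [List.map_cons, List.sum_cons]
      ring

lemma sum_ite_eq_single (n k : Nat) (hk : k < n) (v : Nat → Int) :
    ((List.range n).map (fun j => if j = k then v j else 0)).sum = v k := by
  induction n with
  | zero => omega
  | succ m ih =>
      rw [List.range_succ]
      by_cases h : k = m
      · subst h
        rw [List.map_append, List.sum_append]
        have hz : ((List.range k).map (fun j => if j = k then v j else 0)).sum = 0 := by
          apply List.sum_eq_zero
          intro x hx
          simp only [List.mem_map, List.mem_range] at hx
          obtain ⟨j, hj, rfl⟩ := hx
          simp [Nat.ne_of_lt hj]
        simp [hz]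
      · have hk' : k < m := by omega
        have hm : m ≠ k := fun hx => h hx.symm
        rw [List.map_append, List.sum_append, ih hk']
        simp [hm]

lemma countP_ne_split (n k : Nat) (q : Nat → Bool) :
    (List.range n).countP (fun j => decide (j ≠ k) && q j) =
      (List.range n).countP (fun j => decide (j < k) && q j) +
        (List.range n).countP (fun j => decide (k < j) && q j) := by
  induction n with
  | zero => simp
  | succ m ih =>
      rw [List.range_succ, List.countP_append, List.countP_append, List.countP_append, ih]
      simp only [List.countP_cons, List.countP_nil]
      by_cases hq : q m <;> simp [hq] <;> split_ifs <;> omega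

-- total contribution of all pairs to slot k
lemma sum_aw (cnt : PySem.Dict (String × String) Int) (g : PySem.Dict String Int)
    (F : Nat → String) (n k : Nat) (hk : k < n) :
    ((List.range n).map (fun i => ((List.range n).map (fun j => aw cnt g F i j k)).sum)).sum =
      W cnt g F n k := by
  have hsum : ∀ i ∈ List.range n,
      ((List.range n).map (fun j => aw cnt g F i j k)).sum =
        (if i = k then
          (((List.range n).countP (fun j => decide (k < j) && beats cnt g (F k) (F j))) : Int)
        else 0) +
        (if decide (i < k) && beats cnt g (F k) (F i) then 1 else 0) := by
    intro i _
    by_cases hik : i = k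
    · subst hik
      rw [if_pos rfl, if_neg (by simp), add_zero, ← PySem.List.sum_map_ite_one_zero]
      apply congrArg List.sum
      apply List.map_congr_left
      intro j _
      unfold aw
      by_cases h1 : i < j <;> by_cases h2 : beats cnt g (F i) (F j) = true <;>
        simp [h1, h2] <;> omega
    · rw [if_neg hik, zero_add]
      have hcg : ((List.range n).map (fun j => aw cnt g F i j k)) =
          (List.range n).map (fun j => if j = k then
            (if decide (i < k) && beats cnt g (F k) (F i) then (1:Int) else 0) else 0) := by
        apply List.map_congr_left
        intro j _
        unfold aw
        by_cases hjk : j = k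
        · subst hjk
          by_cases h1 : i < j <;> by_cases h2 : beats cnt g (F j) (F i) = true <;>
            simp [h1, h2, hik] <;> omega
        · by_cases h1 : i < j <;> simp [h1, hjk, fun h : k = i => hik h.symm] <;> omega
      rw [hcg, sum_ite_eq_single n k hk]
  rw [List.map_congr_left hsum, PySem.List.sum_map_add_int,
    sum_ite_eq_single n k hk (fun _ => _), PySem.List.sum_map_ite_one_zero]
  unfold W
  rw [countP_ne_split n k (fun j => beats cnt g (F k) (F j))]
  push_cast
  ring

-- the double loop computes W in every slot
lemma doubleFold_getD (cnt : PySem.Dict (String × String) Int) (g : PySem.Dict String Int)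
    (F : Nat → String) (n : Nat) :
    ∀ k, k < n →
    ((List.range n).foldl (fun lc i =>
        (List.range n).foldl (fun lc j => body cnt g F lc i j) lc)
      (List.replicate n (0 : Int))).getD k 0 = W cnt g F n k ∧
    ((List.range n).foldl (fun lc i =>
        (List.range n).foldl (fun lc j => body cnt g F lc i j) lc)
      (List.replicate n (0 : Int))).length = n := by
  intro k hk
  have hmain := foldl_getD_sum (List.range n)
    (fun lc i => (List.range n).foldl (fun lc j => body cnt g F lc i j) lc)
    (fun i => ((List.range n).map (fun j => aw cnt g F i j k)).sum) n k
    (fun lc i hlc hi => by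
      have hi' : i < n := List.mem_range.mp hi
      have := foldl_getD_sum (List.range n)
        (fun lc j => body cnt g F lc i j) (fun j => aw cnt g F i j k) n k
        (fun lc j hlc' hj => by
          have hj' : j < n := List.mem_range.mp hj
          have hb := body_getD cnt g F lc i j k (by rw [hlc']; exact hi') (by rw [hlc']; exact hj')
          exact ⟨by rw [hb.1, hlc'], hb.2⟩) lc hlc
      simpa using this)
    (List.replicate n (0 : Int)) (by simp)
  refine ⟨?_, hmain.1⟩
  rw [hmain.2, List.getD_replicate _ hk, sum_aw cnt g F n k hk, zero_add]

-- ——— the gifts = [] case (duplicate friend names allowed there) ———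
lemma getD_ofList_zero (fs : List String) (x : String) :
    (PySem.Dict.ofList (fs.map (fun f => (f, (0 : Int))))).getD x 0 = 0 := by
  have hgen : ∀ (l : List String) (d : PySem.Dict String Int), (∀ y, d.getD y 0 = 0) →
      (l.foldl (fun acc f => acc.insert f 0) d).getD x 0 = 0 := by
    intro l
    induction l with
    | nil => intro d hd; exact hd x
    | cons f t ih =>
        intro d hd
        refine ih _ (fun y => ?_)
        rw [PySem.Dict.getD_insert]
        split_ifs <;> [rfl; exact hd y]
  have : PySem.Dict.ofList (fs.map (fun f => (f, (0 : Int)))) =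
      fs.foldl (fun acc f => acc.insert f 0) PySem.Dict.empty := by
    simp only [PySem.Dict.ofList, PySem.Dict.update, List.foldl_map]
  rw [this]
  exact hgen fs PySem.Dict.empty (fun y => PySem.Dict.getD_empty y 0)

lemma pyGetD_cases {α : Type} (xs : List α) (i : Int) (d : α) :
    PySem.List.pyGetD xs i d = d ∨ PySem.List.pyGetD xs i d ∈ xs := by
  rcases h : PySem.List.pyGet? xs i with _ | v
  · exact Or.inl (PySem.List.pyGetD_of_none xs i d h)
  · right
    have hv : PySem.List.pyGetD xs i d = v := by
      simp [PySem.List.pyGetD, h]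
    rw [hv]
    exact PySem.List.mem_of_pyGet?_eq_some xs h

lemma zero_matrix_entry (n : Nat) (i j : Int) :
    PySem.List.pyGetD
      (PySem.List.pyGetD (List.replicate n (List.replicate n (0 : Int))) i []) j 0 = 0 := by
  rcases pyGetD_cases (List.replicate n (List.replicate n (0 : Int))) i [] with h | h
  · rw [h]
    rcases pyGetD_cases ([] : List Int) j 0 with h' | h'
    · exact h'
    · simp at h'
  · rw [List.eq_of_mem_replicate h]
    rcases pyGetD_cases (List.replicate n (0 : Int)) j 0 with h' | h'
    · exact h'
    · exact List.eq_of_mem_replicate h'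

lemma pairBodyA_zero (friends : List String) (lc : List Int) (i j : Int) :
    pairBodyA (List.replicate friends.length (List.replicate friends.length 0))
      (PySem.Dict.ofList (friends.map (fun f => (f, (0 : Int))))) friends lc i j = lc := by
  unfold pairBodyA
  rw [zero_matrix_entry, zero_matrix_entry, getD_ofList_zero, getD_ofList_zero]
  simp

-- ===== VERDICT (by name: the statement is the Claim_ definition above) =====
theorem solution_spec : Claim_equal_solution := by
  intro friends gifts _ hpre
  obtain ⟨hne, hcase, hok⟩ := hpre
  have hn0 : 0 < friends.length := List.length_pos_of_ne_nil hne
  unfold Spec_solution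
  rcases hcase with hgifts | hnd
  · -- gifts = []: every score is 0 on both sides, duplicates or not
    subst hgifts
    simp only [solution, solution_alt, List.foldl_nil, List.map_nil]
    rw [zip_repl]
    have hA : (PySem.List.pyRange 0 (friends.length : Int) 1).foldl (fun lcopy i =>
        (PySem.List.pyRange 0 (friends.length : Int) 1).foldl
          (fun lcopy j => pairBodyA
            (List.replicate friends.length (List.replicate friends.length 0))
            (PySem.Dict.ofList (friends.map (fun f => (f, (0 : Int))))) friends lcopy i j) lcopy)
        (List.replicate friends.length 0) = List.replicate friends.length 0 := by
      rw [PySem.List.foldl_congr_mem' _ _ (fun lc (_ : Int) => lc) _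
        (fun i _ lc => by
          rw [PySem.List.foldl_congr_mem' _ _ (fun lc (_ : Int) => lc) _
            (fun j _ lc' => pairBodyA_zero friends lc' i j)]
          exact List.foldl_fixed _)]
      exact List.foldl_fixed _
    rw [hA]
    have hwins : friends.map (winsOf [] friends) = List.replicate friends.length 0 := by
      have h0 : ∀ a, winsOf [] friends a = 0 := by
        intro a
        unfold winsOf
        have : friends.map (fun b =>
            if netB [] a b > 0 ∨ (netB [] a b = 0 ∧ scoreB [] a > scoreB [] b)
            then (1 : Int) else 0) = friends.map (fun _ => (0 : Int)) := by
          apply List.map_congr_left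
          intro b _
          rw [if_neg]
          intro h
          rcases h with h | h
          · simp [netB, PySem.List.count] at h
          · exact absurd h.2 (by simp [scoreB])
        rw [this]
        simp
      calc friends.map (winsOf [] friends)
          = friends.map (fun _ => (0 : Int)) := List.map_congr_left (fun a _ => h0 a)
        _ = List.replicate friends.length 0 := by
            rw [← List.map_const]
            rfl
    rw [hwins]
  -- friends.Nodup: the general case
  simp only [solution, solution_alt]
  rw [foldA_fst, foldA_snd, zip_repl]
  set G := gifts.foldl stepR
    (PySem.Dict.ofList (friends.map (fun f => (f, (0 : Int))))) with hG
  set CNT := gifts.foldl stepC PySem.Dict.empty with hCNT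
  set L := gifts.foldl (stepL (dOf friends))
    (List.replicate friends.length (List.replicate friends.length 0)) with hLdef
  have hok2 : ∀ s ∈ gifts, ∃ a b, PySem.Str.split₀ s = [a, b] := by
    intro s hs
    have h := hok s hs
    unfold giftOk at h
    rcases hsp : PySem.Str.split₀ s with _ | ⟨a, _ | ⟨b, _ | ⟨c, u⟩⟩⟩ <;> rw [hsp] at h
    · exact absurd h (by simp)
    · exact absurd h (by simp)
    · exact ⟨a, b, rfl⟩
    · exact absurd h (by simp)
  -- B's recounts equal the ghost counter and A's score dict
  have hnet : ∀ x y, netB (gifts.map PySem.Str.split₀) x y =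
      CNT.getD (x, y) 0 - CNT.getD (y, x) 0 := by
    intro x y
    rw [hCNT, stepC_count gifts x y PySem.Dict.empty hok2,
      stepC_count gifts y x PySem.Dict.empty hok2]
    simp only [PySem.Dict.getD_empty]
    unfold netB
    ring
  have hsc : ∀ x, scoreB (gifts.map PySem.Str.split₀) x = G.getD x 0 := by
    intro x
    rw [hG, stepR_score gifts x _ hok2, getD_ofList_zero]
    ring
  -- the matrix agrees with the ghost counter
  have hinv := fold_pres friends hnd gifts _ PySem.Dict.empty hok
    (init_inv friends).1 (init_inv friends).2
  have hLmat : ∀ i j : Nat, i < friends.length → j < friends.length →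
      (L.getD i []).getD j 0 = CNT.getD (friends.getD i "", friends.getD j "") 0 := by
    intro i j hi hj
    have h := hinv.2 (friends.getD i "") (getD_mem friends i hi)
      (friends.getD j "") (getD_mem friends j hj)
    rwa [idxOf_getD friends hnd i hi, idxOf_getD friends hnd j hj] at h
  -- A's double loop in canonical Nat-indexed form
  have hpair : (PySem.List.pyRange 0 (friends.length : Int) 1).foldl (fun lcopy i =>
        (PySem.List.pyRange 0 (friends.length : Int) 1).foldl
          (fun lcopy j => pairBodyA L G friends lcopy i j) lcopy)
      (List.replicate friends.length 0) =
      (List.range friends.length).foldl (fun lc i =>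
        (List.range friends.length).foldl
          (fun lc j => body CNT G (fun k => friends.getD k "") lc i j) lc)
      (List.replicate friends.length 0) := by
    simp only [PySem.List.pyRange_zero_nat, List.foldl_map]
    apply PySem.List.foldl_congr_mem'
    intro i hi lc
    apply PySem.List.foldl_congr_mem'
    intro j hj lc'
    exact pairBody_eq friends L CNT G hLmat lc' i j
      (List.mem_range.mp hi) (List.mem_range.mp hj)
  rw [hpair]
  -- A's final score list, slot by slot
  have hchar := doubleFold_getD CNT G (fun k => friends.getD k "") friends.length
  have hlen : ((List.range friends.length).foldl (fun lc i =>
      (List.range friends.length).foldl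
        (fun lc j => body CNT G (fun k => friends.getD k "") lc i j) lc)
      (List.replicate friends.length 0)).length = friends.length := (hchar 0 hn0).2
  have hlist : ((List.range friends.length).foldl (fun lc i =>
      (List.range friends.length).foldl
        (fun lc j => body CNT G (fun k => friends.getD k "") lc i j) lc)
      (List.replicate friends.length 0)) =
      (List.range friends.length).map
        (fun k => W CNT G (fun j => friends.getD j "") friends.length k) := by
    apply List.ext_getElem
      (by simp only [List.length_map, List.length_range]; exact hlen)
    intro k h1 h2
    have hk : k < friends.length := by omega
    rw [← List.getD_eq_getElem _ 0 h1, (hchar k hk).1]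
    simp [hk]
  rw [hlist]
  -- B's mapped wins list is the same list
  have hB : friends.map (winsOf (gifts.map PySem.Str.split₀) friends) =
      (List.range friends.length).map
        (fun k => W CNT G (fun j => friends.getD j "") friends.length k) := by
    apply List.ext_getElem (by simp)
    intro k h1 h2
    have hk : k < friends.length := by simpa using h1
    rw [List.getElem_map, List.getElem_map, List.getElem_range,
      show friends[k] = friends.getD k "" from (List.getD_eq_getElem friends "" hk).symm,
      winsOf_countP _ friends _ CNT G hnet hsc, countP_beats_W CNT G friends hnd k hk]
  rw [hB]
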